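-- pv_equiv track=rewrite | github.com/satojkovic/algorithms | problems/min_copy_pastes.py | min_copy_pastes
-- ===== SOURCE A (Python) =====
-- def min_copy_pastes(n):
--     dp = [0 for _ in range(n + 1)]
--     for i in range(2, n + 1):
--         dp[i] = i
--         for j in range(i - 1, 1, -1):
--             if i % j == 0:
--                 dp[i] = dp[j] + (i // j)
--                 break
--     return dp[n]
-- ===== SOURCE B (Python) =====
-- def min_copy_pastes(n):
--     if n < 2:
--         return 0
--     total = 0
--     d = 2
--     while d * d <= n:
--         while n % d == 0:
--             total += d
--             n //= d
--         d += 1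
--     if n > 1:
--         total += n
--     return total
-- ===== Notes on version B (the rewrite author's own statement) =====
-- stated objective: faster
-- what changed: Replaces the O(n^2) DP table (for each i, a downward scan for the largest proper divisor) with direct trial-division factorization of n up to sqrt(n), summing the prime factors with multiplicity.
import Mathlib
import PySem

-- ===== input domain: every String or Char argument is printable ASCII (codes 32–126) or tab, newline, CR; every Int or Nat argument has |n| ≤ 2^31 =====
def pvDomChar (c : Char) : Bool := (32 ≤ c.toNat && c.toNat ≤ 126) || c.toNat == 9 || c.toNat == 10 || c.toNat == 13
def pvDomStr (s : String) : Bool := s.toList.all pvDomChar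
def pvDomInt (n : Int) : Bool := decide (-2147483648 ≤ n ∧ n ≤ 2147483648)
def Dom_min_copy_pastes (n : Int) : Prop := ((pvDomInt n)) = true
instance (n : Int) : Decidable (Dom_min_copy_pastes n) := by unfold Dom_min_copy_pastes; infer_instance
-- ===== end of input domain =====

-- B replaces A's O(n^2) divisor-scanning DP table by trial-division factorization of n up to sqrt(n)
-- (summing the prime factors with multiplicity); the Nat fuel arguments below only make the loops total.

-- ===== PORT A =====
-- inner loop 'for j in range(i - 1, 1, -1): if i % j == 0: dp[i] = dp[j] + (i // j); break'
-- as a countdown on j; its value is the final dp[i] (i itself when no divisor is found, = 'dp[i] = i');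
-- fuel = j.toNat at the call site always suffices.
def innerA (i : Int) (dp : List Int) : Int → Nat → Int
  | _, 0 => i
  | j, fuel + 1 =>
    if 2 ≤ j then
      if PySem.Int.mod i j = 0 then (PySem.List.pyGet? dp j).getD 0 + PySem.Int.floordiv i j
      else innerA i dp (j - 1) fuel
    else i

-- outer loop 'for i in range(2, n + 1)': dp[i] is set to the inner loop's value.
def outerA (n : Int) : Int → List Int → Nat → List Int
  | _, dp, 0 => dp
  | i, dp, fuel + 1 =>
    if i < n + 1 then
      outerA n (i + 1) (dp.set i.toNat (innerA i dp (i - 1) (i - 1).toNat)) fuel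
    else dp

def min_copy_pastes (n : Int) : Int :=
  (PySem.List.pyGet? (outerA n 2 (List.replicate (n + 1).toNat 0) (n - 1).toNat) n).getD 0

-- ===== PORT B =====
-- inner 'while n % d == 0: total += d; n //= d'; fuel = m.toNat at the call site always suffices.
def bInner (d : Int) : Int → Int → Nat → Int × Int
  | m, acc, 0 => (m, acc)
  | m, acc, fuel + 1 =>
    if PySem.Int.mod m d = 0 then bInner d (PySem.Int.floordiv m d) (acc + d) fuel
    else (m, acc)

-- outer 'while d * d <= n: … d += 1' plus the trailing 'if n > 1: total += n'.
def bOuter : Int → Int → Int → Nat → Int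
  | _, m, acc, 0 => if 1 < m then acc + m else acc
  | d, m, acc, fuel + 1 =>
    if d * d ≤ m then
      bOuter (d + 1) (bInner d m acc m.toNat).1 (bInner d m acc m.toNat).2 fuel
    else if 1 < m then acc + m else acc

def min_copy_pastes_alt (n : Int) : Int :=
  if n < 2 then 0 else bOuter 2 n 0 (n - 1).toNat

-- ===== PRECONDITION & SPEC =====
-- Pre_ excludes n < 0, where Python A raises IndexError (dp[n] on the too-short dp list).
def Pre_min_copy_pastes (n : Int) : Prop := 0 ≤ n
instance (n : Int) : Decidable (Pre_min_copy_pastes n) := by unfold Pre_min_copy_pastes; infer_instance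
def pvWitness_min_copy_pastes : Int := 10

def Spec_min_copy_pastes (n : Int) (out : Int) : Prop := out = min_copy_pastes_alt n
instance (n : Int) (out : Int) : Decidable (Spec_min_copy_pastes n out) := by unfold Spec_min_copy_pastes; infer_instance

-- ===== CLAIM (what is proved, stated in full; the proofs are below) =====
def Claim_equal_min_copy_pastes : Prop := ∀ (n : Int), Dom_min_copy_pastes n → Pre_min_copy_pastes n → Spec_min_copy_pastes n (min_copy_pastes n)

-- ===== LEMMAS AND PROOFS =====

-- sum of the prime factors of k with multiplicity, as an Int
def pvS (k : Nat) : Int := ((Nat.primeFactorsList k).sum : Int)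

theorem pvS_prime (p : Nat) (hp : p.Prime) : pvS p = (p : Int) := by
  simp [pvS, Nat.primeFactorsList_prime hp]

theorem pvS_div (p m : Nat) (hp : p.Prime) (hd : p ∣ m) (hm : m ≠ 0) :
    pvS m = (p : Int) + pvS (m / p) := by
  have h2 : m = p * (m / p) := (Nat.mul_div_cancel' hd).symm
  have hq : m / p ≠ 0 := by
    intro h0; rw [h0, Nat.mul_zero] at h2; exact hm h2
  have hperm := Nat.perm_primeFactorsList_mul hp.ne_zero hq
  have : pvS m = pvS (p * (m / p)) := by rw [← h2]
  rw [this]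
  simp [pvS, hperm.sum_eq, Nat.primeFactorsList_prime hp]

theorem prime_of_no_small (m d : Nat) (hm : 2 ≤ m) (hlt : m < d * d)
    (hfac : ∀ p : Nat, p.Prime → p ∣ m → d ≤ p) : m.Prime := by
  by_contra h
  have h1 := Nat.minFac_sq_le_self (by omega) h
  have h2 := hfac m.minFac (Nat.minFac_prime (by omega)) (Nat.minFac_dvd m)
  nlinarith [h1, h2]

-- the quotient of i by its largest proper divisor j is prime
theorem quotient_prime (i j : Nat) (hj : 2 ≤ j) (hji : j < i) (hdvd : j ∣ i)
    (hmax : ∀ t : Nat, j < t → t < i → ¬ t ∣ i) : (i / j).Prime := by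
  obtain ⟨q, hq⟩ := hdvd
  have hj0 : j ≠ 0 := by omega
  have hiq : i / j = q := by rw [hq, Nat.mul_div_cancel_left q (by omega)]
  rw [hiq]
  have hq0 : q ≠ 0 := by rintro rfl; simp at hq; omega
  have hq1 : q ≠ 1 := by rintro rfl; simp at hq; omega
  refine Nat.prime_def.mpr ⟨by omega, ?_⟩
  intro a ha
  by_contra hcon
  push_neg at hcon
  obtain ⟨ha1, hap⟩ := hcon
  obtain ⟨r, hr⟩ := ha
  have ha0 : a ≠ 0 := by rintro rfl; simp at hr; exact hq0 hr
  have hr0 : r ≠ 0 := by rintro rfl; simp at hr; exact hq0 hr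
  have hr1 : r ≠ 1 := by rintro rfl; simp at hr; exact hap hr.symm
  have ha2 : 2 ≤ a := by omega
  have ht1 : j < j * r := by
    have : 1 < r := by omega
    exact (Nat.lt_mul_iff_one_lt_right (by omega)).mpr this
  have ht2 : j * r < i := by
    rw [hq, hr]
    calc j * r < (j * r) * a := (Nat.lt_mul_iff_one_lt_right (by positivity)).mpr (by omega)
    _ = j * (a * r) := by ring
  have ht3 : j * r ∣ i := ⟨a, by rw [hq, hr]; ring⟩
  exact hmax _ ht1 ht2 ht3

-- an i ≥ 2 with no divisor strictly between 1 and itself is prime, so its prime-factor sum is i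
theorem pvS_eq_self_of_nodiv (i : Int) (hi : 2 ≤ i)
    (hnd : ∀ t : Int, 2 ≤ t → t < i → ¬ t ∣ i) : pvS i.toNat = i := by
  have hiN : ((i.toNat : Int)) = i := Int.toNat_of_nonneg (by omega)
  have hp : i.toNat.Prime := by
    refine Nat.prime_def.mpr ⟨by omega, ?_⟩
    intro a ha
    by_contra hcon
    push_neg at hcon
    obtain ⟨ha1, hai⟩ := hcon
    have ha0 : a ≠ 0 := by
      intro h0; rw [h0] at ha
      have := Nat.eq_zero_of_zero_dvd ha; omega
    have haq : a ≤ i.toNat := Nat.le_of_dvd (by omega) ha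
    refine hnd (a : Int) (by omega) (by omega) ?_
    rw [← hiN]; exact Int.natCast_dvd_natCast.mpr ha
  rw [pvS_prime _ hp, hiN]

theorem innerA_spec (i : Int) (dp : List Int) (hi : 2 ≤ i)
    (hdp : ∀ t : Int, 2 ≤ t → t < i → (PySem.List.pyGet? dp t).getD 0 = pvS t.toNat) :
    ∀ (fuel : Nat) (j : Int), j.toNat ≤ fuel → j < i →
      (∀ t : Int, j < t → t < i → ¬ t ∣ i) →
      innerA i dp j fuel = pvS i.toNat := by
  intro fuel
  induction fuel with
  | zero =>
    intro j hf hji hmax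
    have : innerA i dp j 0 = i := rfl
    rw [this]
    exact (pvS_eq_self_of_nodiv i hi (fun t ht1 ht2 => hmax t (by omega) ht2)).symm
  | succ fuel ih =>
    intro j hf hji hmax
    by_cases hj : 2 ≤ j
    · by_cases hmod : PySem.Int.mod i j = 0
      · simp only [innerA, if_pos hj, if_pos hmod]
        have hdvd : j ∣ i := (PySem.Int.mod_eq_zero_iff_dvd i j).mp hmod
        have hiN : ((i.toNat : Int)) = i := Int.toNat_of_nonneg (by omega)
        have hjN : ((j.toNat : Int)) = j := Int.toNat_of_nonneg (by omega)
        have hdvdN : j.toNat ∣ i.toNat := by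
          rw [← Int.natCast_dvd_natCast, hiN, hjN]; exact hdvd
        have hmaxN : ∀ t : Nat, j.toNat < t → t < i.toNat → ¬ t ∣ i.toNat := by
          intro t h1 h2 hdt
          refine hmax (t : Int) (by omega) (by omega) ?_
          rw [← hiN]; exact Int.natCast_dvd_natCast.mpr hdt
        have hp := quotient_prime i.toNat j.toNat (by omega) (by omega) hdvdN hmaxN
        have hdiv : PySem.Int.floordiv i j = ((i.toNat / j.toNat : Nat) : Int) := by
          rw [PySem.Int.floordiv_eq_ediv_of_pos (by omega), ← hiN, ← hjN,
            Int.ofNat_ediv_ofNat]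
          simp
        have hback : i.toNat / (i.toNat / j.toNat) = j.toNat :=
          Nat.div_div_self hdvdN (by omega)
        have hsum := pvS_div (i.toNat / j.toNat) i.toNat hp
          (Nat.div_dvd_of_dvd hdvdN) (by omega)
        rw [hdp j (by omega) hji, hdiv, hsum, hback]
        ring
      · simp only [innerA, if_pos hj, if_neg hmod]
        refine ih (j - 1) (by omega) (by omega) ?_
        intro t h1 h2
        by_cases ht : t = j
        · subst ht
          intro hdt
          exact hmod ((PySem.Int.mod_eq_zero_iff_dvd i t).mpr hdt)
        · exact hmax t (by omega) h2
    · simp only [innerA, if_neg hj]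
      exact (pvS_eq_self_of_nodiv i hi (fun t ht1 ht2 => hmax t (by omega) ht2)).symm

theorem outerA_spec (n : Int) :
    ∀ (fuel : Nat) (k : Int) (dp : List Int), 2 ≤ k → (n + 1 - k).toNat ≤ fuel →
      dp.length = (n + 1).toNat →
      (∀ t : Int, 2 ≤ t → t < k → (PySem.List.pyGet? dp t).getD 0 = pvS t.toNat) →
      ∀ i : Int, 2 ≤ i → i ≤ n →
        (PySem.List.pyGet? (outerA n k dp fuel) i).getD 0 = pvS i.toNat := by
  intro fuel
  induction fuel with
  | zero =>
    intro k dp hk hf hlen hinv i hi hin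
    have : outerA n k dp 0 = dp := rfl
    rw [this]
    exact hinv i hi (by omega)
  | succ fuel ih =>
    intro k dp hk hf hlen hinv i hi hin
    by_cases hkn : k < n + 1
    · simp only [outerA, if_pos hkn]
      have hval : innerA k dp (k - 1) (k - 1).toNat = pvS k.toNat :=
        innerA_spec k dp hk hinv (k - 1).toNat (k - 1) le_rfl (by omega)
          (by intro t h1 h2; omega)
      refine ih (k + 1) _ (by omega) (by omega) (by simpa using hlen) ?_ i hi hin
      intro t ht1 ht2
      have htN : ((t.toNat : Int)) = t := Int.toNat_of_nonneg (by omega)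
      have hget : ∀ (xs : List Int), PySem.List.pyGet? xs t = xs[t.toNat]? := by
        intro xs; rw [← htN]; simp [pysem]
      by_cases htk : t = k
      · subst htk
        rw [hget, List.getElem?_set_self (by omega), Option.getD_some, hval]
      · rw [hget, List.getElem?_set_ne (by omega), ← hget]
        exact hinv t ht1 (by omega)
    · simp only [outerA, if_neg hkn]
      exact hinv i hi (by omega)

theorem A_eval (n : Int) (hn : 0 ≤ n) :
    min_copy_pastes n = if n < 2 then 0 else pvS n.toNat := by
  unfold min_copy_pastes
  by_cases h2 : n < 2
  · rw [if_pos h2]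
    have hf : (n - 1).toNat = 0 := by omega
    rw [hf]
    rcases hpg : PySem.List.pyGet? (outerA n 2 (List.replicate (n + 1).toNat (0 : Int)) 0) n with _ | v
    · rfl
    · have hv : v ∈ List.replicate (n + 1).toNat (0 : Int) := by
        have : outerA n 2 (List.replicate (n + 1).toNat (0 : Int)) 0
            = List.replicate (n + 1).toNat (0 : Int) := rfl
        rw [this] at hpg
        exact PySem.List.mem_of_pyGet?_eq_some _ hpg
      have := List.eq_of_mem_replicate hv
      simp [this]
  · rw [if_neg h2]
    exact outerA_spec n (n - 1).toNat 2 _ (by omega) (by omega) (by simp)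
      (by intro t ht1 ht2; omega) n (by omega) le_rfl

theorem bInner_spec (d : Int) :
    ∀ (fuel : Nat) (m acc : Int), 2 ≤ d → 0 < m → m.toNat ≤ fuel →
      (d ∣ m → Nat.Prime d.toNat) →
      0 < (bInner d m acc fuel).1 ∧ (bInner d m acc fuel).1 ∣ m ∧
      ¬ d ∣ (bInner d m acc fuel).1 ∧
      (bInner d m acc fuel).2 + pvS (bInner d m acc fuel).1.toNat = acc + pvS m.toNat := by
  intro fuel
  induction fuel with
  | zero => intro m acc hd hm hf hdp; omega
  | succ fuel ih =>
    intro m acc hd hm hf hdp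
    by_cases hmod : PySem.Int.mod m d = 0
    · simp only [bInner, if_pos hmod]
      have hdvd : d ∣ m := (PySem.Int.mod_eq_zero_iff_dvd m d).mp hmod
      have hp := hdp hdvd
      have hq : PySem.Int.floordiv m d * d = m := by
        rw [PySem.Int.floordiv_eq_ediv_of_pos (by omega)]
        exact Int.ediv_mul_cancel hdvd
      have hpos : 0 < PySem.Int.floordiv m d := by nlinarith
      have hlt : PySem.Int.floordiv m d < m := by nlinarith
      obtain ⟨h1, h2, h3, h4⟩ := ih (PySem.Int.floordiv m d) (acc + d) hd hpos
        (by omega) (fun _ => hp)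
      have hmN : ((m.toNat : Int)) = m := Int.toNat_of_nonneg (by omega)
      have hdN : ((d.toNat : Int)) = d := Int.toNat_of_nonneg (by omega)
      have hdvdN : d.toNat ∣ m.toNat := by
        rw [← Int.natCast_dvd_natCast, hmN, hdN]; exact hdvd
      have hfN : PySem.Int.floordiv m d = ((m.toNat / d.toNat : Nat) : Int) := by
        rw [PySem.Int.floordiv_eq_ediv_of_pos (by omega), ← hmN, ← hdN,
          Int.ofNat_ediv_ofNat]
        simp
      have hsum := pvS_div d.toNat m.toNat hp hdvdN (by omega)
      refine ⟨h1, dvd_trans h2 ⟨d, by linarith [hq]⟩, h3, ?_⟩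
      rw [hsum, hdN]
      have hre : pvS (PySem.Int.floordiv m d).toNat = pvS (m.toNat / d.toNat) := by
        rw [hfN, Int.toNat_natCast]
      rw [hre] at h4
      linarith [h4]
    · simp only [bInner, if_neg hmod]
      refine ⟨hm, dvd_refl m, ?_, by simp⟩
      intro hdvd
      exact hmod ((PySem.Int.mod_eq_zero_iff_dvd m d).mpr hdvd)

-- the value of the exit branch 'if n > 1: total += n' when no divisor ≤ sqrt(m) remains
theorem bOuter_base (d m acc : Int) (hd : 2 ≤ d) (hm : 0 < m) (hlt : m < d * d)
    (hfac : ∀ p : Nat, p.Prime → (p : Int) ∣ m → d ≤ (p : Int)) :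
    (if 1 < m then acc + m else acc) = acc + pvS m.toNat := by
  by_cases h1 : 1 < m
  · rw [if_pos h1]
    have hmN : ((m.toNat : Int)) = m := Int.toNat_of_nonneg (by omega)
    have hdN : ((d.toNat : Int)) = d := Int.toNat_of_nonneg (by omega)
    have hltN : m.toNat < d.toNat * d.toNat := by
      rw [← @Nat.cast_lt Int, Nat.cast_mul, hmN, hdN]; exact hlt
    have hprime : m.toNat.Prime := by
      refine prime_of_no_small m.toNat d.toNat (by omega) hltN ?_
      intro p hp hpd
      have : (p : Int) ∣ m := by rw [← hmN]; exact Int.natCast_dvd_natCast.mpr hpd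
      have := hfac p hp this
      omega
    rw [pvS_prime _ hprime, hmN]
  · rw [if_neg h1]
    have hm1 : m = 1 := by omega
    subst hm1
    have h10 : pvS (Int.toNat 1) = 0 := by simp [pvS]
    omega

theorem bOuter_spec :
    ∀ (fuel : Nat) (d m acc : Int), 2 ≤ d → 0 < m → (m + 1 - d).toNat ≤ fuel →
      (∀ p : Nat, p.Prime → (p : Int) ∣ m → d ≤ (p : Int)) →
      bOuter d m acc fuel = acc + pvS m.toNat := by
  intro fuel
  induction fuel with
  | zero =>
    intro d m acc hd hm hf hfac
    have hdd : d ≤ d * d := by nlinarith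
    have : bOuter d m acc 0 = if 1 < m then acc + m else acc := rfl
    rw [this]
    exact bOuter_base d m acc hd hm (by omega) hfac
  | succ fuel ih =>
    intro d m acc hd hm hf hfac
    by_cases hddm : d * d ≤ m
    · simp only [bOuter, if_pos hddm]
      have hdp : d ∣ m → Nat.Prime d.toNat := by
        intro hdm
        have hq := Nat.minFac_prime (n := d.toNat) (by omega)
        have hdN : ((d.toNat : Int)) = d := Int.toNat_of_nonneg (by omega)
        have hqd : ((d.toNat.minFac : Nat) : Int) ∣ m := by
          refine dvd_trans ?_ hdm
          rw [← hdN]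
          exact Int.natCast_dvd_natCast.mpr (Nat.minFac_dvd _)
        have h1 := hfac _ hq hqd
        have h2 : d.toNat.minFac ≤ d.toNat := Nat.minFac_le (by omega)
        have h3 : d.toNat.minFac = d.toNat := by omega
        rwa [h3] at hq
      obtain ⟨h1, h2, h3, h4⟩ := bInner_spec d m.toNat m acc hd hm le_rfl hdp
      have hle : (bInner d m acc m.toNat).1 ≤ m := Int.le_of_dvd hm h2
      rw [ih (d + 1) _ _ (by omega) h1 (by omega) ?_]
      · linarith [h4]
      · intro p hp hpd
        have hpm : (p : Int) ∣ m := dvd_trans hpd h2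
        have := hfac p hp hpm
        rcases lt_or_eq_of_le this with hlt | heq
        · omega
        · exfalso; rw [← heq] at hpd; exact h3 hpd
    · simp only [bOuter, if_neg hddm]
      exact bOuter_base d m acc hd hm (by omega) hfac

theorem B_eval (n : Int) (hn : 0 ≤ n) :
    min_copy_pastes_alt n = if n < 2 then 0 else pvS n.toNat := by
  unfold min_copy_pastes_alt
  by_cases h2 : n < 2
  · rw [if_pos h2, if_pos h2]
  · rw [if_neg h2, if_neg h2]
    rw [bOuter_spec (n - 1).toNat 2 n 0 le_rfl (by omega) (by omega) ?_]
    · ring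
    · intro p hp _
      have := hp.two_le
      omega

-- ===== VERDICT (by name: the statement is the Claim_ definition above) =====
theorem min_copy_pastes_spec : Claim_equal_min_copy_pastes := by
  intro n _hdom hpre
  unfold Spec_min_copy_pastes
  rw [A_eval n hpre, B_eval n hpre]
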